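-- pv_equiv track=rewrite | github.com/ensookim/algorithm | BaekJoon/1202.py | maximize_jewel_value
-- ===== SOURCE A (Python) =====
-- import heapq
--
-- def maximize_jewel_value(n, k, jewels, bags):
--     # 보석을 무게 기준으로 정렬
--     jewels.sort()
--     # 가방을 무게 기준으로 정렬
--     bags.sort()
--
--     max_value = 0
--     max_heap = []
--     jewel_index = 0
--
--     # 가방에 대해 탐색
--     for bag_capacity in bags:
--         # 가방 무게보다 작거나 같은 보석을 최대 힙에 추가
--         while jewel_index < n and jewels[jewel_index][0] <= bag_capacity:
--             heapq.heappush(max_heap, -jewels[jewel_index][1])  # 가격을 음수로 삽입 (최대 힙처럼 사용)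
--             jewel_index += 1
--
--         # 힙에서 가장 비싼 보석을 선택
--         if max_heap:
--             max_value -= heapq.heappop(max_heap)
--
--     return max_value
-- ===== SOURCE B (Python) =====
-- def maximize_jewel_value(n, k, jewels, bags):
--     # Same in-place sorts as the original (observable side effect on the arguments).
--     jewels.sort()
--     bags.sort()
--
--     # The first n jewels (by weight) are the usable ones; a negative count means none.
--     avail = jewels[:max(n, 0)]
--
--     total = 0
--     for cap in bags:
--         candidates = [j for j in avail if j[0] <= cap]
--         if candidates:
--             best = max(candidates, key=lambda j: j[1])
--             avail.remove(best)
--             total += best[1]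
--     return total
-- ===== Notes on version B (the rewrite author's own statement) =====
-- stated objective: simpler
-- what changed: Replaces the two-pointer sweep with a heapq max-heap by a direct per-bag scan: take the first n jewels of the weight-sorted list, and for each bag (ascending) pick and remove the most valuable still-available jewel that fits, so the moving jewel index and the heap disappear.
import Mathlib
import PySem

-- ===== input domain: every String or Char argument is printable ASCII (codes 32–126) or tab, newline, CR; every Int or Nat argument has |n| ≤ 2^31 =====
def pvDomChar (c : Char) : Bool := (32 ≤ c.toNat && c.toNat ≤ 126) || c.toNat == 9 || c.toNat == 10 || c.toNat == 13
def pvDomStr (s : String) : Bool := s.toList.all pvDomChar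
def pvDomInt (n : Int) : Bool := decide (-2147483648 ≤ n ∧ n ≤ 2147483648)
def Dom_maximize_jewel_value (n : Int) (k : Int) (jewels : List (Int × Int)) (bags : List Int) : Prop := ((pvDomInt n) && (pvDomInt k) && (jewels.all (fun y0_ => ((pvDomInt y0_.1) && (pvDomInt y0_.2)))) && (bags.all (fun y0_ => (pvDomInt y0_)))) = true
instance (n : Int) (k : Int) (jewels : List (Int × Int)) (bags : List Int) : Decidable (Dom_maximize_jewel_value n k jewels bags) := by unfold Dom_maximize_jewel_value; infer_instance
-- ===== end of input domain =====

-- B replaces A's moving jewel index + heapq max-heap by a direct per-bag scan of the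
-- remaining usable jewels (simpler decomposition, not faster). Both A and B sort the
-- jewels and bags arguments in place in Python; the theorems here are about the return value.

-- ===== PORT A =====
-- Models heapq's observable operations exactly: the heap is kept as an ascending sorted
-- list, heappush is ordered insertion, heappop is the head (the minimum); A only observes
-- pushes, pop-min and emptiness, so this is exact for A's result.
def pvHeapPush (heap : List Int) (x : Int) : List Int :=
  match heap with
  | [] => [x]
  | y :: ys => if x ≤ y then x :: y :: ys else y :: pvHeapPush ys x

-- the inner 'while jewel_index < n and jewels[jewel_index][0] <= bag_capacity' loop;
-- returns (new jewel_index, new heap). On the input where Python raises IndexError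
-- (jewels[jewel_index] out of range while jewel_index < n) it stops; Pre_ excludes those inputs.
def pvWhileA (n : Int) (J : List (Int × Int)) (cap : Int) (i : Int) (heap : List Int) : Int × List Int :=
  if _h : i < n then
    match PySem.List.pyGet? J i with
    | none => (i, heap)   -- Python: IndexError (excluded by Pre_)
    | some jw => if jw.1 ≤ cap then pvWhileA n J cap (i + 1) (pvHeapPush heap (-jw.2)) else (i, heap)
  else (i, heap)
  termination_by (n - i).toNat
  decreasing_by omega

-- the 'for bag_capacity in bags' loop with state (jewel_index, max_heap, max_value)
def pvLoopA (n : Int) (J : List (Int × Int)) (bags : List Int) (i : Int) (heap : List Int) (acc : Int) : Int :=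
  match bags with
  | [] => acc
  | c :: cs =>
    let p := pvWhileA n J c i heap
    match p.2 with
    | [] => pvLoopA n J cs p.1 [] acc
    | m :: t => pvLoopA n J cs p.1 t (acc - m)   -- max_value -= heappop(max_heap)

def maximize_jewel_value (n : Int) (k : Int) (jewels : List (Int × Int)) (bags : List Int) : Int :=
  pvLoopA n (PySem.List.sorted2 jewels Prod.fst Prod.snd) (PySem.List.sorted bags (fun x => x)) 0 [] 0

-- ===== PORT B =====
-- the 'for cap in bags' loop of Source B: scan the remaining usable jewels for the most
-- valuable one that fits, remove it (list.remove = first occurrence; the element is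
-- always present, so getD's default is never taken), add its value.
def pvLoopB (bags : List Int) (avail : List (Int × Int)) (total : Int) : Int :=
  match bags with
  | [] => total
  | c :: cs =>
    let candidates := avail.filter (fun j => decide (j.1 ≤ c))
    match PySem.List.max? candidates (fun j => j.2) with
    | none => pvLoopB cs avail total
    | some best => pvLoopB cs ((PySem.List.remove? avail best).getD avail) (total + best.2)

def maximize_jewel_value_alt (n : Int) (k : Int) (jewels : List (Int × Int)) (bags : List Int) : Int :=
  pvLoopB (PySem.List.sorted bags (fun x => x))
    (PySem.List.slice (PySem.List.sorted2 jewels Prod.fst Prod.snd) none (some (max n 0))) 0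

-- ===== PRECONDITION & SPEC =====
-- Pre_ excludes exactly the inputs on which Python A raises IndexError: n exceeds the
-- number of jewels, there is at least one bag, and no jewel is heavier than every bag
-- (so the jewel index runs past the end of the list).
def Pre_maximize_jewel_value (n : Int) (k : Int) (jewels : List (Int × Int)) (bags : List Int) : Prop :=
  n ≤ (jewels.length : Int) ∨ bags = [] ∨ (∃ j ∈ jewels, ∀ b ∈ bags, b < j.1)
instance (n : Int) (k : Int) (jewels : List (Int × Int)) (bags : List Int) : Decidable (Pre_maximize_jewel_value n k jewels bags) := by unfold Pre_maximize_jewel_value; infer_instance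

def pvWitness_maximize_jewel_value : Int × Int × (List (Int × Int)) × List Int :=
  (3, 1, [(1, 10), (2, 20), (3, 30)], [2, 3])

def Spec_maximize_jewel_value (n : Int) (k : Int) (jewels : List (Int × Int)) (bags : List Int) (out : Int) : Prop := out = maximize_jewel_value_alt n k jewels bags
instance (n : Int) (k : Int) (jewels : List (Int × Int)) (bags : List Int) (out : Int) : Decidable (Spec_maximize_jewel_value n k jewels bags out) := by unfold Spec_maximize_jewel_value; infer_instance

-- ===== CLAIM (what is proved, stated in full; the proofs are below) =====
def Claim_equal_maximize_jewel_value : Prop := ∀ (n : Int) (k : Int) (jewels : List (Int × Int)) (bags : List Int), Dom_maximize_jewel_value n k jewels bags → Pre_maximize_jewel_value n k jewels bags → Spec_maximize_jewel_value n k jewels bags (maximize_jewel_value n k jewels bags)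


-- ===== LEMMAS AND PROOFS =====

-- weight-eligibility predicate used by both loops at capacity c
def pvFit (c : Int) : (Int × Int) → Bool := fun j => decide (j.1 ≤ c)

def pvPush (hh : List Int) (j : Int × Int) : List Int := pvHeapPush hh (-j.2)

-- mid-level form of A's loop: the pending jewels are carried as a list, the quota is gone
def pvLoopM : List Int → List (Int × Int) → List Int → Int → Int
  | [], _, _, acc => acc
  | c :: cs, P, h, acc =>
    match (P.takeWhile (pvFit c)).foldl pvPush h with
    | [] => pvLoopM cs (P.dropWhile (pvFit c)) [] acc
    | m :: t => pvLoopM cs (P.dropWhile (pvFit c)) t (acc - m)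

lemma pvHeapPush_perm (h : List Int) (x : Int) : (pvHeapPush h x).Perm (x :: h) := by
  induction h with
  | nil => simp [pvHeapPush]
  | cons y ys ih =>
    simp only [pvHeapPush]
    split
    · exact List.Perm.refl _
    · exact (ih.cons y).trans (List.Perm.swap x y ys)

lemma pvHeapPush_pairwise (h : List Int) (x : Int) (hs : h.Pairwise (· ≤ ·)) :
    (pvHeapPush h x).Pairwise (· ≤ ·) := by
  induction h with
  | nil => simp [pvHeapPush]
  | cons y ys ih =>
    rcases List.pairwise_cons.mp hs with ⟨hy, hys⟩
    simp only [pvHeapPush]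
    split
    · rename_i hxy
      refine List.pairwise_cons.mpr ⟨?_, hs⟩
      intro b hb
      rcases List.mem_cons.mp hb with rfl | hb'
      · exact hxy
      · exact le_trans hxy (hy _ hb')
    · rename_i hxy
      refine List.pairwise_cons.mpr ⟨?_, ih hys⟩
      intro b hb
      have hmem := (pvHeapPush_perm ys x).mem_iff.mp hb
      rcases List.mem_cons.mp hmem with rfl | hb'
      · omega
      · exact hy _ hb'

lemma pvFoldlPush_perm (l : List (Int × Int)) :
    ∀ h : List Int, (l.foldl pvPush h).Perm (h ++ l.map (fun p => -p.2)) := by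
  induction l with
  | nil => intro h; simp
  | cons j js ih =>
    intro h
    simp only [List.foldl_cons, List.map_cons]
    refine (ih (pvPush h j)).trans ?_
    have h1 : (pvPush h j ++ js.map (fun p => -p.2)).Perm ((-j.2 :: h) ++ js.map (fun p => -p.2)) :=
      (pvHeapPush_perm h (-j.2)).append_right _
    refine h1.trans ?_
    simpa using (List.perm_middle (a := -j.2) (l₁ := h) (l₂ := js.map (fun p => -p.2))).symm

lemma pvFoldlPush_pairwise (l : List (Int × Int)) :
    ∀ h : List Int, h.Pairwise (· ≤ ·) → (l.foldl pvPush h).Pairwise (· ≤ ·) := by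
  induction l with
  | nil => intro h hs; simpa using hs
  | cons j js ih =>
    intro h hs
    exact ih _ (pvHeapPush_pairwise h (-j.2) hs)

-- the inner while loop, re-expressed on the pending list (J.drop i).take (n - i)
lemma pvWhileA_eq (n : Int) (J : List (Int × Int)) (c : Int) :
    ∀ (fuel : Nat) (i : Int) (h : List Int), 0 ≤ i → (n - i).toNat = fuel →
    pvWhileA n J c i h =
      (i + ((((J.drop i.toNat).take (n - i).toNat).takeWhile (pvFit c)).length : Int),
       (((J.drop i.toNat).take (n - i).toNat).takeWhile (pvFit c)).foldl pvPush h)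
    ∧ (J.drop (i + ((((J.drop i.toNat).take (n - i).toNat).takeWhile (pvFit c)).length : Int)).toNat).take
        (n - (i + ((((J.drop i.toNat).take (n - i).toNat).takeWhile (pvFit c)).length : Int))).toNat
      = ((J.drop i.toNat).take (n - i).toNat).dropWhile (pvFit c) := by
  intro fuel
  induction fuel with
  | zero =>
    intro i h hi hf
    have hni : ¬ i < n := by omega
    have h0 : (n - i).toNat = 0 := hf
    rw [pvWhileA]
    simp [hni, h0]
  | succ fk ih =>
    intro i h hi hf
    have hin : i < n := by omega
    rw [pvWhileA]
    simp only [hin, dif_pos]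
    rcases hg : PySem.List.pyGet? J i with _ | jw
    · have hg' : J[i.toNat]? = none := by
        rw [← PySem.List.pyGet?_of_nonneg J hi]; exact hg
      have hlen : J.length ≤ i.toNat := by
        by_contra hlt
        simp [List.getElem?_eq_getElem (by omega : i.toNat < J.length)] at hg'
      have hdrop : J.drop i.toNat = [] := List.drop_eq_nil_of_le hlen
      have hdrop2 : J.drop (i + (0:Nat)).toNat = [] := by simpa using hdrop
      simp [hdrop]
    · have hg' : J[i.toNat]? = some jw := by
        rw [← PySem.List.pyGet?_of_nonneg J hi]; exact hg
      have hlen : i.toNat < J.length := by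
        by_contra hlt
        simp [List.getElem?_eq_none (by omega : J.length ≤ i.toNat)] at hg'
      have hjw : J[i.toNat] = jw := by
        have := List.getElem?_eq_getElem hlen
        rw [this] at hg'; exact Option.some.inj hg'
      have hdrop : J.drop i.toNat = jw :: J.drop (i.toNat + 1) := by
        rw [← List.getElem_cons_drop (as := J) (i := i.toNat) hlen, hjw]
      have htn : (n - i).toNat = fk + 1 := hf
      have hidx : (i + 1).toNat = i.toNat + 1 := by omega
      have hk : (n - (i + 1)).toNat = fk := by omega
      have htake : (J.drop i.toNat).take (n - i).toNat
          = jw :: (J.drop (i.toNat + 1)).take fk := by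
        rw [hdrop, htn, List.take_succ_cons]
      by_cases hw : jw.1 ≤ c
      · simp only [hw, if_pos]
        obtain ⟨h1, h2⟩ := ih (i + 1) (pvHeapPush h (-jw.2)) (by omega) (by omega)
        have hP' : (J.drop (i + 1).toNat).take (n - (i + 1)).toNat
            = (J.drop (i.toNat + 1)).take fk := by rw [hidx, hk]
        rw [hP'] at h1 h2
        have hTW : ((J.drop i.toNat).take (n - i).toNat).takeWhile (pvFit c)
            = jw :: ((J.drop (i.toNat + 1)).take fk).takeWhile (pvFit c) := by
          rw [htake, List.takeWhile_cons]
          simp [pvFit, hw]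
        have hDW : ((J.drop i.toNat).take (n - i).toNat).dropWhile (pvFit c)
            = ((J.drop (i.toNat + 1)).take fk).dropWhile (pvFit c) := by
          rw [htake, List.dropWhile_cons]
          simp [pvFit, hw]
        set T := ((J.drop (i.toNat + 1)).take fk).takeWhile (pvFit c) with hT
        have hlen1 : i + ((jw :: T).length : Int) = (i + 1) + (T.length : Int) := by
          simp; omega
        constructor
        · rw [h1, hTW, hlen1]
          simp only [List.foldl_cons]
          rfl
        · rw [hTW, hDW, hlen1, h2]
      · simp only [hw, if_false]
        have hTW : ((J.drop i.toNat).take (n - i).toNat).takeWhile (pvFit c) = [] := by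
          rw [htake, List.takeWhile_cons]
          simp [pvFit, hw]
        have hDW : ((J.drop i.toNat).take (n - i).toNat).dropWhile (pvFit c)
            = (J.drop i.toNat).take (n - i).toNat := by
          rw [htake, List.dropWhile_cons]
          simp [pvFit, hw, htake]
        rw [hTW, hDW]
        simp

-- A's loop equals the mid-level loop
lemma pvLoopA_eq_pvLoopM (n : Int) (J : List (Int × Int)) :
    ∀ (bags : List Int) (i : Int) (h : List Int) (acc : Int), 0 ≤ i →
      pvLoopA n J bags i h acc = pvLoopM bags ((J.drop i.toNat).take (n - i).toNat) h acc := by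
  intro bags
  induction bags with
  | nil => intro i h acc hi; rfl
  | cons c cs ih =>
    intro i h acc hi
    obtain ⟨h1, h2⟩ := pvWhileA_eq n J c (n - i).toNat i h hi rfl
    simp only [pvLoopA, pvLoopM, h1]
    set T := ((J.drop i.toNat).take (n - i).toNat).takeWhile (pvFit c) with hT
    rcases hh : T.foldl pvPush h with _ | ⟨m, t⟩
    · dsimp only
      rw [ih (i + (T.length : Int)) [] acc (by omega), h2]
    · dsimp only
      rw [ih (i + (T.length : Int)) t (acc - m) (by omega), h2]

-- on a weight-sorted list, the fitting jewels are exactly an initial segment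
lemma pvFilter_eq_takeWhile (c : Int) :
    ∀ P : List (Int × Int), P.Pairwise (fun a b => a.1 ≤ b.1) →
      P.filter (pvFit c) = P.takeWhile (pvFit c) := by
  intro P
  induction P with
  | nil => intro _; rfl
  | cons x ps ih =>
    intro hp
    rcases List.pairwise_cons.mp hp with ⟨hx, hps⟩
    by_cases hfx : x.1 ≤ c
    · simp [List.filter_cons, List.takeWhile_cons, pvFit, hfx, ih hps]
    · have hnil : ps.filter (pvFit c) = [] := by
        refine List.filter_eq_nil_iff.mpr ?_
        intro y hy
        have := hx y hy
        simp only [pvFit, decide_eq_true_eq]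
        omega
      simp [List.filter_cons, List.takeWhile_cons, pvFit, hfx, hnil]

-- the main invariant: avail = F ++ P, the heap holds the negated values of F
lemma pvLoopM_eq_pvLoopB :
    ∀ (C : List Int), C.Pairwise (· ≤ ·) →
    ∀ (F P : List (Int × Int)) (h : List Int) (acc : Int),
      h.Perm (F.map (fun p => -p.2)) →
      h.Pairwise (· ≤ ·) →
      P.Pairwise (fun a b => a.1 ≤ b.1) →
      (∀ x ∈ F, ∀ c ∈ C, x.1 ≤ c) →
      pvLoopM C P h acc = pvLoopB C (F ++ P) acc := by
  intro C
  induction C with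
  | nil => intro _ F P h acc _ _ _ _; rfl
  | cons c cs ih =>
    intro hC F P h acc hperm hsort hP hF
    rcases List.pairwise_cons.mp hC with ⟨hc, hcs⟩
    have hfit : (fun j : Int × Int => decide (j.1 ≤ c)) = pvFit c := rfl
    simp only [pvLoopM, pvLoopB, hfit]
    have hFfit : F.filter (pvFit c) = F := by
      refine List.filter_eq_self.mpr ?_
      intro x hx
      simp only [pvFit, decide_eq_true_eq]
      exact hF x hx c List.mem_cons_self
    have hcand : (F ++ P).filter (pvFit c) = F ++ P.takeWhile (pvFit c) := by
      rw [List.filter_append, hFfit, pvFilter_eq_takeWhile c P hP]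
    set P1 := P.takeWhile (pvFit c) with hP1def
    set P2 := P.dropWhile (pvFit c) with hP2def
    have hP12 : P = P1 ++ P2 := (List.takeWhile_append_dropWhile).symm
    have hP2pw : P2.Pairwise (fun a b => a.1 ≤ b.1) :=
      List.Pairwise.sublist (List.dropWhile_sublist _) hP
    have h1perm : (P1.foldl pvPush h).Perm ((F ++ P1).map (fun p => -p.2)) := by
      refine (pvFoldlPush_perm P1 h).trans ?_
      rw [List.map_append]
      exact hperm.append_right _
    have h1sort := pvFoldlPush_pairwise P1 h hsort
    rw [hcand]
    rcases hmax : PySem.List.max? (F ++ P1) (fun j => j.2) with _ | e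
    · have hFP1 : F ++ P1 = [] := (PySem.List.max?_eq_none_iff _ _).mp hmax
      rcases List.append_eq_nil_iff.mp hFP1 with ⟨hF0, hP10⟩
      have hh : h = [] := by
        have := hperm
        rw [hF0] at this
        simpa using this.eq_nil
      have hfold : P1.foldl pvPush h = [] := by rw [hP10, hh]; rfl
      rw [hfold]
      dsimp only
      have havail : F ++ P = P2 := by rw [hF0, hP12, hP10]; simp
      rw [havail]
      exact ih hcs [] P2 [] acc (by simp) (by simp) hP2pw (by simp)
    · have he : e ∈ F ++ P1 := PySem.List.max?_mem hmax
      have hmaxv : ∀ y ∈ F ++ P1, y.2 ≤ e.2 := PySem.List.max?_isMax hmax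
      have heavail : e ∈ F ++ P := by
        rcases List.mem_append.mp he with h' | h'
        · exact List.mem_append.mpr (Or.inl h')
        · exact List.mem_append.mpr (Or.inr ((List.takeWhile_sublist _).subset h'))
      have hrem : (PySem.List.remove? (F ++ P) e).getD (F ++ P) = (F ++ P).erase e := by
        rw [PySem.List.remove?_eq_some_erase _ e heavail]; rfl
      have herase : (F ++ P).erase e = (F ++ P1).erase e ++ P2 := by
        conv_lhs => rw [hP12, ← List.append_assoc]
        exact List.erase_append_left _ he
      have hne : P1.foldl pvPush h ≠ [] := by
        intro h0
        rw [h0] at h1perm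
        have := h1perm.symm.eq_nil
        rw [List.map_eq_nil_iff] at this
        rw [this] at he
        exact absurd he (List.not_mem_nil)
      rcases hsc : P1.foldl pvPush h with _ | ⟨m, t⟩
      · exact absurd hsc hne
      rw [hsc] at h1perm h1sort
      have hmmem : m ∈ (F ++ P1).map (fun p => -p.2) :=
        h1perm.mem_iff.mp List.mem_cons_self
      obtain ⟨y, hy, hym⟩ := List.mem_map.mp hmmem
      have hmin : ∀ z ∈ m :: t, m ≤ z := by
        intro z hz
        rcases List.mem_cons.mp hz with rfl | hz'
        · exact le_refl _
        · exact (List.pairwise_cons.mp h1sort).1 z hz'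
      have hez : -e.2 ∈ m :: t :=
        h1perm.mem_iff.mpr (List.mem_map_of_mem he)
      have hm : m = -e.2 := by
        have h1 := hmin _ hez
        have h2 := hmaxv y hy
        omega
      have hFP1e : (F ++ P1).Perm (e :: (F ++ P1).erase e) := List.perm_cons_erase he
      have htperm : t.Perm (((F ++ P1).erase e).map (fun p => -p.2)) := by
        have hh' := h1perm.trans (hFP1e.map (fun p => -p.2))
        rw [List.map_cons, hm] at hh'
        exact hh'.cons_inv
      have htsort : t.Pairwise (· ≤ ·) := h1sort.of_cons
      have hF' : ∀ x ∈ (F ++ P1).erase e, ∀ c' ∈ cs, x.1 ≤ c' := by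
        intro x hx c' hc'
        rcases List.mem_append.mp (List.mem_of_mem_erase hx) with h' | h'
        · exact hF x h' c' (List.mem_cons_of_mem _ hc')
        · have := List.mem_takeWhile_imp h'
          simp only [pvFit, decide_eq_true_eq] at this
          exact le_trans this (hc c' hc')
      dsimp only
      rw [hrem, herase]
      have hacc : acc - m = acc + e.2 := by omega
      rw [hacc]
      exact ih hcs ((F ++ P1).erase e) P2 t (acc + e.2) htperm htsort hP2pw hF' 

-- sorted2 with keys fst, snd yields nondecreasing first components
lemma pvInsertBy_pairwise (before : (Int × Int) → (Int × Int) → Bool)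
    (hb1 : ∀ a b, before a b = true → a.1 ≤ b.1)
    (hb2 : ∀ a b, before a b = false → b.1 ≤ a.1)
    (x : Int × Int) :
    ∀ l : List (Int × Int), l.Pairwise (fun a b => a.1 ≤ b.1) →
      (PySem.List.insertBy before x l).Pairwise (fun a b => a.1 ≤ b.1) := by
  intro l
  induction l with
  | nil => intro _; simp [PySem.List.insertBy]
  | cons y ys ih =>
    intro hl
    rcases List.pairwise_cons.mp hl with ⟨hy, hys⟩
    by_cases hb : before x y = true
    · simp only [PySem.List.insertBy, hb, if_true]
      refine List.pairwise_cons.mpr ⟨?_, hl⟩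
      intro b hbmem
      rcases List.mem_cons.mp hbmem with rfl | hb'
      · exact hb1 _ _ hb
      · exact le_trans (hb1 _ _ hb) (hy _ hb')
    · have hbf : before x y = false := by simpa using hb
      simp only [PySem.List.insertBy, hbf]
      refine List.pairwise_cons.mpr ⟨?_, ih hys⟩
      intro b hbmem
      rcases (PySem.List.mem_insertBy before x b ys).mp hbmem with rfl | hb'
      · exact hb2 _ _ hbf
      · exact hy _ hb' 

lemma pvSorted2_weights_pairwise (xs : List (Int × Int)) :
    (PySem.List.sorted2 xs Prod.fst Prod.snd).Pairwise (fun a b => a.1 ≤ b.1) := by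
  have hb1 : ∀ a b : Int × Int,
      (decide (a.1 < b.1) || (!decide (b.1 < a.1) && decide (a.2 < b.2))) = true → a.1 ≤ b.1 := by
    intro a b hab
    simp only [Bool.or_eq_true, Bool.and_eq_true, Bool.not_eq_true', decide_eq_true_eq,
      decide_eq_false_iff_not] at hab
    rcases hab with h | ⟨h, _⟩ <;> omega
  have hb2 : ∀ a b : Int × Int,
      (decide (a.1 < b.1) || (!decide (b.1 < a.1) && decide (a.2 < b.2))) = false → b.1 ≤ a.1 := by
    intro a b hab
    simp only [Bool.or_eq_false_iff, Bool.and_eq_false_iff, Bool.not_eq_false',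
      decide_eq_false_iff_not, decide_eq_true_eq] at hab
    omega
  have key : ∀ (l : List (Int × Int)) (acc : List (Int × Int)),
      acc.Pairwise (fun a b => a.1 ≤ b.1) →
      (l.foldl (fun a x => PySem.List.insertBy
        (fun a b => decide (a.1 < b.1) || (!decide (b.1 < a.1) && decide (a.2 < b.2))) x a) acc).Pairwise
        (fun a b => a.1 ≤ b.1) := by
    intro l
    induction l with
    | nil => intro acc hacc; simpa using hacc
    | cons x l ih =>
      intro acc hacc
      exact ih _ (pvInsertBy_pairwise _ hb1 hb2 x acc hacc)
  exact key xs [] (by simp)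

-- ===== VERDICT (by name: the statement is the Claim_ definition above) =====
theorem maximize_jewel_value_spec : Claim_equal_maximize_jewel_value := by
  intro n k jewels bags _ _
  unfold Spec_maximize_jewel_value maximize_jewel_value maximize_jewel_value_alt
  set J := PySem.List.sorted2 jewels Prod.fst Prod.snd with hJ
  set C := PySem.List.sorted bags (fun x => x) with hC
  have hCpw : C.Pairwise (· ≤ ·) := by
    simpa using PySem.List.sorted_pairwise bags (fun x => x)
  have hJpw : J.Pairwise (fun a b => a.1 ≤ b.1) := pvSorted2_weights_pairwise jewels
  rw [pvLoopA_eq_pvLoopM n J C 0 [] 0 (le_refl 0)]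
  have hdrop0 : (J.drop (0 : Int).toNat).take (n - 0).toNat = J.take n.toNat := by simp
  rw [hdrop0]
  have hslice : PySem.List.slice J none (some (max n 0)) = J.take n.toNat := by
    rw [PySem.List.slice_to J (le_max_right n 0)]
    congr 1
    omega
  rw [hslice]
  have hmain := pvLoopM_eq_pvLoopB C hCpw [] (J.take n.toNat) [] 0 (by simp) (by simp)
    (List.Pairwise.sublist (List.take_sublist ..) hJpw) (by simp)
  simpa using hmain
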